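-- pv_equiv track=rewrite | github.com/joefrancisGA/ArchiForge | scripts/ci/assert_pr_b_tracker_in_sync.py | compare_checklists
-- ===== SOURCE A (Python) =====
-- from collections import Counter
--
-- def _normalize_label(label: str) -> str:
--     collapsed = " ".join(label.split())
--     return collapsed.strip()
--
-- def compare_checklists(adr_labels: list[str], tracker_labels: list[str]) -> tuple[list[str], list[str], bool]:
--     """Return (drift_messages, contradiction_messages, has_contradiction)."""
--
--     drift: list[str] = []
--     adr_norm = [_normalize_label(s) for s in adr_labels]
--     tr_norm = [_normalize_label(s) for s in tracker_labels]
--     ca: Counter[str] = Counter(adr_norm)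
--     ct: Counter[str] = Counter(tr_norm)
--     contradictions: list[str] = []
--
--     if ca != ct:
--         only_adr = sorted((ca - ct).elements())
--         only_tr = sorted((ct - ca).elements())
--         if only_adr:
--             contradictions.append(f"Items only in ADR 0029 (by multiset): {only_adr!r}")
--         if only_tr:
--             contradictions.append(f"Items only in PHASE_3_PR_B_TODO.md (by multiset): {only_tr!r}")
--         return drift, contradictions, True
--
--     if adr_norm == tr_norm:
--         if adr_labels != tracker_labels:
--             drift.append("Checklist labels match when normalized but raw Markdown differs (whitespace).")
--         return drift, contradictions, False
--
--     drift.append("Checklist item order differs between ADR 0029 and PHASE_3_PR_B_TODO.md (same items when normalized).")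
--     return drift, contradictions, False
-- ===== SOURCE B (Python) =====
-- def _normalize_label(label: str) -> str:
--     collapsed = " ".join(label.split())
--     return collapsed.strip()
--
--
-- def compare_checklists(adr_labels: list[str], tracker_labels: list[str]) -> tuple[list[str], list[str], bool]:
--     """Return (drift_messages, contradiction_messages, has_contradiction)."""
--     adr_norm = [_normalize_label(s) for s in adr_labels]
--     tr_norm = [_normalize_label(s) for s in tracker_labels]
--     sa = sorted(adr_norm)
--     st = sorted(tr_norm)
--
--     if sa != st:
--         # two-pointer merge over the two sorted lists: surplus elements
--         # (with multiplicity) fall out already sorted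
--         only_adr: list[str] = []
--         only_tr: list[str] = []
--         i = j = 0
--         while i < len(sa) and j < len(st):
--             if sa[i] == st[j]:
--                 i += 1
--                 j += 1
--             elif sa[i] < st[j]:
--                 only_adr.append(sa[i])
--                 i += 1
--             else:
--                 only_tr.append(st[j])
--                 j += 1
--         only_adr.extend(sa[i:])
--         only_tr.extend(st[j:])
--         contradictions: list[str] = []
--         if only_adr:
--             contradictions.append(f"Items only in ADR 0029 (by multiset): {only_adr!r}")
--         if only_tr:
--             contradictions.append(f"Items only in PHASE_3_PR_B_TODO.md (by multiset): {only_tr!r}")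
--         return [], contradictions, True
--
--     if adr_norm == tr_norm:
--         drift: list[str] = []
--         if adr_labels != tracker_labels:
--             drift.append("Checklist labels match when normalized but raw Markdown differs (whitespace).")
--         return drift, [], False
--
--     return ["Checklist item order differs between ADR 0029 and PHASE_3_PR_B_TODO.md (same items when normalized)."], [], False
-- ===== Notes on version B (the rewrite author's own statement) =====
-- stated objective: alternative
-- what changed: The two Counters, Counter subtraction and Counter.elements() are replaced by sorted copies of the normalized lists compared directly and a two-pointer merge walk that emits both surplus lists already sorted, removing the Counter/dict machinery and the final sorts of the element streams.
import Mathlib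
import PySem

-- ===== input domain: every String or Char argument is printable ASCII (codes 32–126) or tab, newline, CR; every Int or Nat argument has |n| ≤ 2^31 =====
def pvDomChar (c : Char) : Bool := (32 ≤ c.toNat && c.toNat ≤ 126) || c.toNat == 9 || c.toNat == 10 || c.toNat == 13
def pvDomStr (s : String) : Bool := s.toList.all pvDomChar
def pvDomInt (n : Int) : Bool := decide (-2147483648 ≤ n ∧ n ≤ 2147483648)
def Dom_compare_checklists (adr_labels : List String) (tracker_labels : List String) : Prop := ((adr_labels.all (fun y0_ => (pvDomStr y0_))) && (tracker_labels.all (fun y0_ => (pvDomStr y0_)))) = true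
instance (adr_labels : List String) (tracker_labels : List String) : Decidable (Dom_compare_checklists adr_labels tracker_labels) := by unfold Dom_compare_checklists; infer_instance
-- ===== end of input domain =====

-- B replaces A's two Counters by sorted copies of the normalized lists and a
-- two-pointer merge that emits both surplus lists already sorted (objective:
-- alternative decomposition, same asymptotic cost up to the sort).


-- ===== PORT A =====

-- _normalize_label: " ".join(label.split()).strip()
def pvNormalize (label : String) : String :=
  let collapsed := PySem.Str.join " " (PySem.Str.split₀ label)
  PySem.Str.strip collapsed

-- Python repr of a string (exact for the printable-ASCII + tab/newline/CR domain:
-- escapes are backslash, the quote character, \t, \n, \r; quote is ' unless the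
-- string contains ' and no ")
def pvReprStr (s : String) : String :=
  let cs := s.toList
  let q : Char := if '\'' ∈ cs ∧ ¬ ('"' ∈ cs) then '"' else '\''
  let body := cs.flatMap (fun c =>
    if c = '\\' ∨ c = q then ['\\', c]
    else if c = '\t' then ['\\', 't']
    else if c = '\n' then ['\\', 'n']
    else if c = '\r' then ['\\', 'r']
    else [c])
  String.ofList (q :: (body ++ [q]))

-- Python repr of a list of strings
def pvReprList (l : List String) : String :=
  "[" ++ PySem.Str.join ", " (l.map pvReprStr) ++ "]"

-- Python's 'ca != ct' on dicts compares them as mappings (order-insensitive);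
-- exact for counters of lists, whose values are never 0
def pyDictEqCounter (d e : PySem.Dict String Int) : Bool :=
  d.keys.all (fun k => e.getD k 0 == d.getD k 0) && e.keys.all (fun k => d.getD k 0 == e.getD k 0)

-- Counter.__sub__: keep keys of d whose count minus e's count is positive, in d's
-- order (CPython's second loop over e never fires: counters of lists are positive)
def counterSub (d e : PySem.Dict String Int) : PySem.Dict String Int :=
  PySem.Dict.mk (d.items.filterMap (fun p =>
    if 0 < p.2 - e.getD p.1 0 then some (p.1, p.2 - e.getD p.1 0) else none))

-- Counter.elements(): each key repeated by its count, in insertion order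
def counterElements (d : PySem.Dict String Int) : List String :=
  d.items.flatMap (fun p => List.replicate p.2.toNat p.1)

def compare_checklists (adr_labels : List String) (tracker_labels : List String) : List String × List String × Bool :=
  let drift : List String := []
  let adr_norm := adr_labels.map pvNormalize
  let tr_norm := tracker_labels.map pvNormalize
  let ca := PySem.Dict.counter adr_norm
  let ct := PySem.Dict.counter tr_norm
  let contradictions : List String := []
  if ¬ (pyDictEqCounter ca ct = true) then
    let only_adr := PySem.List.sorted (counterElements (counterSub ca ct)) (fun x => x) false
    let only_tr := PySem.List.sorted (counterElements (counterSub ct ca)) (fun x => x) false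
    let contradictions := if only_adr ≠ [] then contradictions ++ ["Items only in ADR 0029 (by multiset): " ++ pvReprList only_adr] else contradictions
    let contradictions := if only_tr ≠ [] then contradictions ++ ["Items only in PHASE_3_PR_B_TODO.md (by multiset): " ++ pvReprList only_tr] else contradictions
    (drift, contradictions, true)
  else if adr_norm = tr_norm then
    let drift := if adr_labels ≠ tracker_labels then drift ++ ["Checklist labels match when normalized but raw Markdown differs (whitespace)."] else drift
    (drift, contradictions, false)
  else
    (drift ++ ["Checklist item order differs between ADR 0029 and PHASE_3_PR_B_TODO.md (same items when normalized)."], contradictions, false)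

-- ===== PORT B =====

-- the two-pointer merge walk of Source B: surplus of the left sorted list goes to
-- the first output, surplus of the right one to the second
def mergeDiff : List String → List String → List String × List String
  | [], t => ([], t)
  | x :: s, [] => (x :: s, [])
  | x :: s, y :: t =>
    if x = y then mergeDiff s t
    else if x < y then
      let r := mergeDiff s (y :: t)
      (x :: r.1, r.2)
    else
      let r := mergeDiff (x :: s) t
      (r.1, y :: r.2)
  termination_by s t => s.length + t.length

def compare_checklists_alt (adr_labels : List String) (tracker_labels : List String) : List String × List String × Bool :=
  let adr_norm := adr_labels.map pvNormalize
  let tr_norm := tracker_labels.map pvNormalize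
  let sa := PySem.List.sorted adr_norm (fun x => x) false
  let st := PySem.List.sorted tr_norm (fun x => x) false
  if sa ≠ st then
    let r := mergeDiff sa st
    let only_adr := r.1
    let only_tr := r.2
    let contradictions : List String := []
    let contradictions := if only_adr ≠ [] then contradictions ++ ["Items only in ADR 0029 (by multiset): " ++ pvReprList only_adr] else contradictions
    let contradictions := if only_tr ≠ [] then contradictions ++ ["Items only in PHASE_3_PR_B_TODO.md (by multiset): " ++ pvReprList only_tr] else contradictions
    ([], contradictions, true)
  else if adr_norm = tr_norm then
    ((if adr_labels ≠ tracker_labels then ["Checklist labels match when normalized but raw Markdown differs (whitespace)."] else []), [], false)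
  else
    (["Checklist item order differs between ADR 0029 and PHASE_3_PR_B_TODO.md (same items when normalized)."], [], false)

-- ===== PRECONDITION & SPEC =====
def Spec_compare_checklists (adr_labels : List String) (tracker_labels : List String) (out : List String × List String × Bool) : Prop := out = compare_checklists_alt adr_labels tracker_labels
instance (adr_labels : List String) (tracker_labels : List String) (out : List String × List String × Bool) : Decidable (Spec_compare_checklists adr_labels tracker_labels out) := by unfold Spec_compare_checklists; infer_instance

-- ===== CLAIM (what is proved, stated in full; the proofs are below) =====
def Claim_equal_compare_checklists : Prop := ∀ (adr_labels : List String) (tracker_labels : List String), Dom_compare_checklists adr_labels tracker_labels → Spec_compare_checklists adr_labels tracker_labels (compare_checklists adr_labels tracker_labels)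

-- ===== LEMMAS AND PROOFS =====

-- Python's Counter equality is count-for-count equality
lemma pyDictEqCounter_iff (a t : List String) :
    pyDictEqCounter (PySem.Dict.counter a) (PySem.Dict.counter t) = true ↔
      ∀ x, a.count x = t.count x := by
  unfold pyDictEqCounter
  simp only [Bool.and_eq_true, List.all_eq_true, PySem.Dict.keys_counter,
    PySem.Dict.getD_counter, beq_iff_eq, PySem.Set.mem_ofList]
  constructor
  · rintro ⟨h1, h2⟩ x
    by_cases hxa : x ∈ a
    · exact_mod_cast (h1 x hxa).symm
    · by_cases hxt : x ∈ t
      · exact_mod_cast h2 x hxt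
      · rw [List.count_eq_zero_of_not_mem hxa, List.count_eq_zero_of_not_mem hxt]
  · intro h
    exact ⟨fun k _ => by exact_mod_cast (h k).symm, fun k _ => by exact_mod_cast h k⟩

-- the flatMap-of-replicate form of Counter.elements ∘ Counter.__sub__
lemma flatMap_filterMap_rep (l : List String) (m n : String → Nat) :
    ((l.map (fun k => (k, (m k : Int)))).filterMap (fun p =>
        if 0 < p.2 - (n p.1 : Int) then some (p.1, p.2 - (n p.1 : Int)) else none)).flatMap
      (fun p => List.replicate p.2.toNat p.1)
    = l.flatMap (fun k => List.replicate (m k - n k) k) := by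
  induction l with
  | nil => rfl
  | cons k l ih =>
    simp only [List.map_cons, List.filterMap_cons, List.flatMap_cons]
    split_ifs with h
    · simp only [List.flatMap_cons, ih]
      congr 2
      omega
    · rw [ih]
      have : m k - n k = 0 := by omega
      simp [this]

-- counting in a flatMap of replicates over distinct keys
lemma count_flatMap_rep (l : List String) (hl : l.Nodup) (g : String → Nat) (x : String) :
    (l.flatMap (fun k => List.replicate (g k) k)).count x = if x ∈ l then g x else 0 := by
  induction l with
  | nil => simp
  | cons k l ih =>
    rcases List.nodup_cons.mp hl with ⟨hk, hl'⟩
    simp only [List.flatMap_cons, List.count_append, ih hl', List.mem_cons]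
    by_cases hxk : x = k
    · subst hxk
      simp [if_neg hk]
    · simp [List.count_replicate, Ne.symm hxk, hxk]

-- the multiset surplus a-minus-t, counted
lemma count_counterElements_sub (a t : List String) (x : String) :
    (counterElements (counterSub (PySem.Dict.counter a) (PySem.Dict.counter t))).count x
      = a.count x - t.count x := by
  unfold counterElements counterSub
  have hitems : (PySem.Dict.mk ((PySem.Dict.counter a).items.filterMap (fun p =>
      if 0 < p.2 - (PySem.Dict.counter t).getD p.1 0 then some (p.1, p.2 - (PySem.Dict.counter t).getD p.1 0) else none))).items
      = (PySem.Dict.counter a).items.filterMap (fun p =>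
      if 0 < p.2 - (PySem.Dict.counter t).getD p.1 0 then some (p.1, p.2 - (PySem.Dict.counter t).getD p.1 0) else none) := rfl
  rw [hitems, PySem.Dict.items_counter]
  have h1 : (List.filterMap (fun p =>
        if 0 < p.2 - (PySem.Dict.counter t).getD p.1 0 then some (p.1, p.2 - (PySem.Dict.counter t).getD p.1 0) else none)
        ((PySem.Set.ofList a).map (fun k => (k, (List.count k a : Int)))))
      = (List.filterMap (fun p =>
        if 0 < p.2 - (List.count p.1 t : Int) then some (p.1, p.2 - (List.count p.1 t : Int)) else none)
        ((PySem.Set.ofList a).map (fun k => (k, (List.count k a : Int))))) := by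
    congr 1
    funext p
    rw [PySem.Dict.getD_counter]
  rw [h1, flatMap_filterMap_rep (PySem.Set.ofList a) (fun k => List.count k a) (fun k => List.count k t),
      count_flatMap_rep _ (PySem.Set.nodup_ofList a) _ x]
  by_cases hx : x ∈ a
  · simp [PySem.Set.mem_ofList, hx]
  · have : List.count x a = 0 := List.count_eq_zero_of_not_mem hx
    simp [PySem.Set.mem_ofList, hx, this]

-- both components of the merge walk keep their elements
lemma mergeDiff_subset (s t : List String) :
    (∀ z ∈ (mergeDiff s t).1, z ∈ s) ∧ (∀ z ∈ (mergeDiff s t).2, z ∈ t) := by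
  fun_induction mergeDiff s t <;> simp_all <;> tauto

-- counts of the merge walk's outputs on sorted inputs
lemma mergeDiff_count (s t : List String) (x : String) :
    s.Pairwise (· ≤ ·) → t.Pairwise (· ≤ ·) →
    (mergeDiff s t).1.count x = s.count x - t.count x ∧
      (mergeDiff s t).2.count x = t.count x - s.count x := by
  fun_induction mergeDiff s t with
  | case1 t => intro _ _; simp
  | case2 xh s => intro _ _; simp
  | case3 s y t ih =>
    intro hs ht
    obtain ⟨h1, h2⟩ := ih hs.of_cons ht.of_cons
    simp only [List.count_cons, h1, h2]
    constructor <;> split <;> omega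
  | case4 xh s y t hne hlt r ih =>
    intro hs ht
    obtain ⟨h1, h2⟩ := ih hs.of_cons ht
    have h0 : xh ∉ y :: t := by
      intro hmem
      rcases List.mem_cons.mp hmem with rfl | hm
      · exact hne rfl
      · exact absurd (List.rel_of_pairwise_cons ht hm) (not_le.mpr hlt)
    simp only [r] at *
    by_cases hx : x = xh
    · subst hx
      have hc : List.count x (y :: t) = 0 := List.count_eq_zero_of_not_mem h0
      constructor
      · rw [List.count_cons_self, List.count_cons_self, h1, hc]; omega
      · rw [h2, hc, List.count_cons_self]; omega
    · rw [List.count_cons_of_ne (Ne.symm hx), List.count_cons_of_ne (Ne.symm hx)]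
      exact ⟨h1, h2⟩
  | case5 xh s y t hne hnlt r ih =>
    intro hs ht
    obtain ⟨h1, h2⟩ := ih hs ht.of_cons
    have hyl : y < xh := lt_of_le_of_ne (not_lt.mp hnlt) (fun h => hne h.symm)
    have h0 : y ∉ xh :: s := by
      intro hmem
      rcases List.mem_cons.mp hmem with rfl | hm
      · exact hne rfl
      · exact absurd (List.rel_of_pairwise_cons hs hm) (not_le.mpr hyl)
    simp only [r] at *
    by_cases hx : x = y
    · subst hx
      have hc : List.count x (xh :: s) = 0 := List.count_eq_zero_of_not_mem h0
      constructor
      · rw [h1, hc, List.count_cons_self]; omega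
      · rw [List.count_cons_self, List.count_cons_self, h2, hc]; omega
    · rw [List.count_cons_of_ne (Ne.symm hx), List.count_cons_of_ne (Ne.symm hx)]
      exact ⟨h1, h2⟩

-- the merge walk's outputs are sorted
lemma mergeDiff_pairwise (s t : List String) :
    s.Pairwise (· ≤ ·) → t.Pairwise (· ≤ ·) →
    (mergeDiff s t).1.Pairwise (· ≤ ·) ∧ (mergeDiff s t).2.Pairwise (· ≤ ·) := by
  fun_induction mergeDiff s t with
  | case1 t => intro _ ht; exact ⟨List.Pairwise.nil, ht⟩
  | case2 xh s => intro hs _; exact ⟨hs, List.Pairwise.nil⟩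
  | case3 s y t ih =>
    intro hs ht; exact ih hs.of_cons ht.of_cons
  | case4 xh s y t hne hlt r ih =>
    intro hs ht
    obtain ⟨h1, h2⟩ := ih hs.of_cons ht
    simp only [r] at *
    refine ⟨List.pairwise_cons.mpr ⟨fun z hz => ?_, h1⟩, h2⟩
    exact List.rel_of_pairwise_cons hs ((mergeDiff_subset _ _).1 z hz)
  | case5 xh s y t hne hnlt r ih =>
    intro hs ht
    obtain ⟨h1, h2⟩ := ih hs ht.of_cons
    simp only [r] at *
    refine ⟨h1, List.pairwise_cons.mpr ⟨fun z hz => ?_, h2⟩⟩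
    exact List.rel_of_pairwise_cons ht ((mergeDiff_subset _ _).2 z hz)

-- A's two sorted Counter surpluses are exactly B's two merge surpluses
lemma only_eq (a t : List String) :
    PySem.List.sorted (counterElements (counterSub (PySem.Dict.counter a) (PySem.Dict.counter t))) (fun x => x) false
      = (mergeDiff (PySem.List.sorted a (fun x => x) false) (PySem.List.sorted t (fun x => x) false)).1
    ∧ PySem.List.sorted (counterElements (counterSub (PySem.Dict.counter t) (PySem.Dict.counter a))) (fun x => x) false
      = (mergeDiff (PySem.List.sorted a (fun x => x) false) (PySem.List.sorted t (fun x => x) false)).2 := by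
  have hsa := PySem.List.sorted_pairwise a (fun x => x)
  have hst := PySem.List.sorted_pairwise t (fun x => x)
  have hcnt := fun x => mergeDiff_count _ _ x hsa hst
  have hca : ∀ x, (PySem.List.sorted a (fun x => x) false).count x = a.count x :=
    fun x => (PySem.List.sorted_perm a (fun x => x) false).count_eq x
  have hct : ∀ x, (PySem.List.sorted t (fun x => x) false).count x = t.count x :=
    fun x => (PySem.List.sorted_perm t (fun x => x) false).count_eq x
  have hpw := mergeDiff_pairwise _ _ hsa hst
  have antisymm : ∀ (l1 l2 : List String), ∀ a b : String, a ∈ l1 → b ∈ l2 → a ≤ b → b ≤ a → a = b :=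
    fun _ _ a b _ _ h1 h2 => le_antisymm h1 h2
  constructor
  · refine List.Perm.eq_of_pairwise (antisymm _ _) (PySem.List.sorted_pairwise _ _) hpw.1 ?_
    refine List.perm_iff_count.mpr (fun z => ?_)
    rw [(PySem.List.sorted_perm _ (fun x => x) false).count_eq z, count_counterElements_sub,
      (hcnt z).1, hca, hct]
  · refine List.Perm.eq_of_pairwise (antisymm _ _) (PySem.List.sorted_pairwise _ _) hpw.2 ?_
    refine List.perm_iff_count.mpr (fun z => ?_)
    rw [(PySem.List.sorted_perm _ (fun x => x) false).count_eq z, count_counterElements_sub,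
      (hcnt z).2, hca, hct]

-- A's Counter-equality test agrees with B's sorted-lists test
lemma dictEq_iff_sortedEq (a t : List String) :
    pyDictEqCounter (PySem.Dict.counter a) (PySem.Dict.counter t) = true ↔
      PySem.List.sorted a (fun x => x) false = PySem.List.sorted t (fun x => x) false := by
  rw [pyDictEqCounter_iff, PySem.List.sorted_id_eq_sorted_id_iff_perm, List.perm_iff_count]

-- the two ports agree everywhere
lemma ports_eq (A T : List String) : compare_checklists A T = compare_checklists_alt A T := by
  unfold compare_checklists compare_checklists_alt
  by_cases hEq : pyDictEqCounter (PySem.Dict.counter (A.map pvNormalize)) (PySem.Dict.counter (T.map pvNormalize)) = true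
  · have hs := (dictEq_iff_sortedEq _ _).mp hEq
    simp only [if_neg (not_not_intro hEq), hs, ne_eq, not_true_eq_false, if_false]
    simp
  · have hsne : PySem.List.sorted (A.map pvNormalize) (fun x => x) false ≠
        PySem.List.sorted (T.map pvNormalize) (fun x => x) false :=
      fun h => hEq ((dictEq_iff_sortedEq _ _).mpr h)
    simp only [if_pos hEq, if_pos hsne, (only_eq (A.map pvNormalize) (T.map pvNormalize)).1,
      (only_eq (A.map pvNormalize) (T.map pvNormalize)).2]

-- ===== VERDICT (by name: the statement is the Claim_ definition above) =====
theorem compare_checklists_spec : Claim_equal_compare_checklists := by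
  intro A T _
  exact ports_eq A T
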